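-- pv_equiv track=rewrite | github.com/jn134447/iwa-labovi | vjezba_01/main.py | validate_links
-- ===== SOURCE A (Python) =====
-- def validate_links(links: list[str]) -> list[str]:
--     rem = []
--     for link in links:
--         if not link.startswith("http://"):
--             rem.append(link)
--     for rlink in rem:
--         links.remove(rlink)
--
--     return links
-- ===== SOURCE B (Python) =====
-- def validate_links(links: list[str]) -> list[str]:
--     n = 0
--     for link in links:
--         if link.startswith("http://"):
--             links[n] = link
--             n += 1
--     del links[n:]
--     return links
-- ===== Notes on version B (the rewrite author's own statement) =====
-- stated objective: faster
-- what changed: Replaces A's collect-bad-links-then-repeated-.remove() (each remove rescans the list) with a single-pass in-place write-pointer compaction followed by one truncation, still mutating and returning the same list object.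
import Mathlib
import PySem

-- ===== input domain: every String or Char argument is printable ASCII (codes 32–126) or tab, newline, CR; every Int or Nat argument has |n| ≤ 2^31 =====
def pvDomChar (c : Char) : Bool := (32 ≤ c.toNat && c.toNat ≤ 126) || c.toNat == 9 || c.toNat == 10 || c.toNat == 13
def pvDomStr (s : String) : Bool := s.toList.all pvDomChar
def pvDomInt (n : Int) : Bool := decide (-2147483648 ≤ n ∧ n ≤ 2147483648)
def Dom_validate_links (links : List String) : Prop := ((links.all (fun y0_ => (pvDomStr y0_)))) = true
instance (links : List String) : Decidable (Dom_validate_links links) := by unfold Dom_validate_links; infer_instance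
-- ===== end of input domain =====

-- B replaces A's collect-then-repeated-.remove() with a one-pass in-place write-pointer
-- compaction plus one truncation; both mutate the argument list in Python (return-value
-- equivalence is what is proved here; B performs the same in-place mutation).

-- ===== PORT A =====
def validate_links (links : List String) : List String :=
  -- rem = []; for link in links: if not link.startswith("http://"): rem.append(link)
  let rem := links.foldl
    (fun acc link => if !(PySem.Str.startswith link "http://") then acc ++ [link] else acc) []
  -- for rlink in rem: links.remove(rlink)   (every rlink is in links, so remove never raises;
  -- the .getD branch for a failed remove? is unreachable)
  rem.foldl (fun ls rlink => (PySem.List.remove? ls rlink).getD ls) links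

-- ===== PORT B =====
def validate_links_alt (links : List String) : List String :=
  -- n = 0; for link in links: if link.startswith("http://"): links[n] = link; n += 1
  let st := links.foldl
    (fun (st : List String × Nat) link =>
      if PySem.Str.startswith link "http://" then (st.1.set st.2 link, st.2 + 1) else st)
    (links, 0)
  -- del links[n:]; return links
  st.1.take st.2

-- ===== PRECONDITION & SPEC =====
def Spec_validate_links (links : List String) (out : List String) : Prop := out = validate_links_alt links
instance (links : List String) (out : List String) : Decidable (Spec_validate_links links out) := by unfold Spec_validate_links; infer_instance

-- ===== CLAIM (what is proved, stated in full; the proofs are below) =====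
def Claim_equal_validate_links : Prop := ∀ (links : List String), Dom_validate_links links → Spec_validate_links links (validate_links links)

-- ===== LEMMAS AND PROOFS =====

-- A's first loop accumulates exactly the complement filter (generic in the predicate)
lemma pv_rem_eq (q : String → Bool) (l : List String) : ∀ (acc : List String),
    l.foldl (fun acc link => if !(q link) then acc ++ [link] else acc) acc
      = acc ++ l.filter (fun x => !q x) := by
  induction l with
  | nil => intro acc; simp
  | cons x xs ih =>
    intro acc
    cases hq : q x
    · rw [List.foldl_cons, if_pos (by simp [hq]), ih]
      simp [List.filter_cons, hq]
    · rw [List.foldl_cons, if_neg (by simp [hq]), ih]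
      simp [List.filter_cons, hq]

-- removing elements all different from the head leaves the head in place
lemma pv_remove_cons (rs : List String) : ∀ (x : String) (xs : List String),
    (∀ r ∈ rs, r ≠ x) →
    rs.foldl (fun ls rlink => (PySem.List.remove? ls rlink).getD ls) (x :: xs)
      = x :: rs.foldl (fun ls rlink => (PySem.List.remove? ls rlink).getD ls) xs := by
  induction rs with
  | nil => intro x xs _; rfl
  | cons r rs ih =>
    intro x xs h
    have hne : x ≠ r := Ne.symm (h r (by simp))
    rw [List.foldl_cons, List.foldl_cons, PySem.List.remove?_cons_of_ne xs hne]
    cases hrem : PySem.List.remove? xs r with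
    | none => simp only [hrem, Option.map_none, Option.getD_none]
              exact ih x xs (fun r hr => h r (by simp [hr]))
    | some t => simp only [hrem, Option.map_some, Option.getD_some]
                exact ih x t (fun r hr => h r (by simp [hr]))

-- A's second loop, fed the complement filter, yields the positive filter
lemma pv_remove_filter (q : String → Bool) (l : List String) :
    (l.filter (fun x => !q x)).foldl
        (fun ls rlink => (PySem.List.remove? ls rlink).getD ls) l
      = l.filter q := by
  induction l with
  | nil => rfl
  | cons x xs ih =>
    cases hq : q x
    · have hfe : (x :: xs).filter (fun x => !q x) = x :: xs.filter (fun x => !q x) := by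
        simp [List.filter_cons, hq]
      rw [hfe, List.foldl_cons]
      simp only [PySem.List.remove?_cons_self, Option.getD_some]
      rw [ih]
      simp [List.filter_cons, hq]
    · have hfe : (x :: xs).filter (fun x => !q x) = xs.filter (fun x => !q x) := by
        simp [List.filter_cons, hq]
      rw [hfe, pv_remove_cons _ _ _ ?_, ih]
      · simp [List.filter_cons, hq]
      · intro r hr he
        have hr' := List.of_mem_filter (p := fun x => !q x) hr
        rw [he] at hr'
        simp [hq] at hr'

lemma pv_take_succ_set (ls : List String) : ∀ (n : Nat) (y : String), n < ls.length →
    (ls.set n y).take (n + 1) = ls.take n ++ [y] := by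
  induction ls with
  | nil => intro n y h; simp at h
  | cons a as ih =>
    intro n y h
    cases n with
    | zero => simp
    | succ m =>
      simp only [List.set, List.take, List.cons_append]
      rw [ih m y (by simpa using h)]

-- invariant of B's write-pointer loop (generic in the predicate)
lemma pv_alt_inv (q : String → Bool) (ys : List String) : ∀ (ls : List String) (n : Nat),
    n + ys.length ≤ ls.length →
    (let st := ys.foldl
        (fun (st : List String × Nat) link =>
          if q link then (st.1.set st.2 link, st.2 + 1) else st)
        (ls, n)
     st.1.take st.2) = ls.take n ++ ys.filter q := by
  induction ys with
  | nil => intro ls n _; simp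
  | cons y ys ih =>
    intro ls n hlen
    cases hq : q y
    · rw [List.foldl_cons]
      simp only
      rw [if_neg (by simp [hq])]
      have := ih ls n (by simp at hlen ⊢; omega)
      simp only at this
      rw [this]
      simp [List.filter_cons, hq]
    · have hn : n < ls.length := by simp at hlen; omega
      rw [List.foldl_cons]
      simp only
      rw [if_pos (by simp [hq])]
      have := ih (ls.set n y) (n + 1) (by simp at hlen ⊢; omega)
      simp only at this
      rw [this, pv_take_succ_set ls n y hn]
      simp [List.filter_cons, hq]

lemma pv_A_eq_filter (links : List String) :
    validate_links links = links.filter (fun s => PySem.Str.startswith s "http://") := by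
  unfold validate_links
  simp only [pv_rem_eq (fun s => PySem.Str.startswith s "http://") links, List.nil_append]
  exact pv_remove_filter (fun s => PySem.Str.startswith s "http://") links

lemma pv_B_eq_filter (links : List String) :
    validate_links_alt links = links.filter (fun s => PySem.Str.startswith s "http://") := by
  unfold validate_links_alt
  have := pv_alt_inv (fun s => PySem.Str.startswith s "http://") links links 0 (by simp)
  simpa using this

-- ===== VERDICT (by name: the statement is the Claim_ definition above) =====
theorem validate_links_spec : Claim_equal_validate_links := by
  intro links _
  unfold Spec_validate_links
  rw [pv_A_eq_filter, pv_B_eq_filter]
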